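-- pv_equiv track=rewrite | github.com/latonaamayah/envguard | envguard/weightier.py | _compute_weight
-- ===== SOURCE A (Python) =====
-- from typing import Dict, List, Optional
--
-- _SENSITIVE_PATTERNS = ("password", "secret", "token", "key", "api", "auth")
--
-- _LONG_VALUE_THRESHOLD = 64
--
-- def _compute_weight(key: str, value: str, rules: Optional[Dict[str, int]]) -> tuple[int, str]:
--     """Compute a weight score and reason for a key/value pair."""
--     if rules and key in rules:
--         return rules[key], "explicit rule"
--
--     weight = 0
--     reasons = []
--
--     lower = key.lower()
--     if any(p in lower for p in _SENSITIVE_PATTERNS):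
--         weight += 30
--         reasons.append("sensitive key")
--
--     if not value or value.strip() == "":
--         weight -= 20
--         reasons.append("empty value")
--     elif len(value) > _LONG_VALUE_THRESHOLD:
--         weight += 10
--         reasons.append("long value")
--
--     if key == key.upper():
--         weight += 5
--         reasons.append("uppercase key")
--
--     return weight, ", ".join(reasons) if reasons else "default"
-- ===== SOURCE B (Python) =====
-- from typing import Dict, List, Optional
--
-- _SENSITIVE_PATTERNS = ("password", "secret", "token", "key", "api", "auth")
--
-- _LONG_VALUE_THRESHOLD = 64
--
-- # Precompute every possible outcome once: the score is fully determined by three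
-- # independent features (sensitive? x value-class x uppercase?), so build the
-- # 2*3*2 = 12-entry outcome table at import time and do a single lookup per call.
-- _S_OPTS = [(False, 0, []), (True, 30, ["sensitive key"])]
-- _V_OPTS = [("empty", -20, ["empty value"]), ("long", 10, ["long value"]), ("normal", 0, [])]
-- _U_OPTS = [(False, 0, []), (True, 5, ["uppercase key"])]
--
-- _TABLE = {
--     (s, vc, u): (ws + wv + wu, ", ".join(rs + rv + ru) or "default")
--     for s, ws, rs in _S_OPTS
--     for vc, wv, rv in _V_OPTS
--     for u, wu, ru in _U_OPTS
-- }
--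
-- def _compute_weight(key: str, value: str, rules: Optional[Dict[str, int]]) -> tuple[int, str]:
--     if rules and key in rules:
--         return rules[key], "explicit rule"
--     lower = key.lower()
--     s = any(p in lower for p in _SENSITIVE_PATTERNS)
--     if value.strip() == "":
--         vc = "empty"
--     elif len(value) > _LONG_VALUE_THRESHOLD:
--         vc = "long"
--     else:
--         vc = "normal"
--     u = key == key.upper()
--     return _TABLE[(s, vc, u)]
-- ===== Notes on version B (the rewrite author's own statement) =====
-- stated objective: alternative
-- what changed: Instead of accumulating weight and reasons through a chain of branches per call, B precomputes at import time the full 12-entry outcome table indexed by the three independent features (sensitive key, value class empty/long/normal, uppercase key) and answers each call with one feature classification plus a single table lookup; the explicit-rule early return is kept.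
import Mathlib
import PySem

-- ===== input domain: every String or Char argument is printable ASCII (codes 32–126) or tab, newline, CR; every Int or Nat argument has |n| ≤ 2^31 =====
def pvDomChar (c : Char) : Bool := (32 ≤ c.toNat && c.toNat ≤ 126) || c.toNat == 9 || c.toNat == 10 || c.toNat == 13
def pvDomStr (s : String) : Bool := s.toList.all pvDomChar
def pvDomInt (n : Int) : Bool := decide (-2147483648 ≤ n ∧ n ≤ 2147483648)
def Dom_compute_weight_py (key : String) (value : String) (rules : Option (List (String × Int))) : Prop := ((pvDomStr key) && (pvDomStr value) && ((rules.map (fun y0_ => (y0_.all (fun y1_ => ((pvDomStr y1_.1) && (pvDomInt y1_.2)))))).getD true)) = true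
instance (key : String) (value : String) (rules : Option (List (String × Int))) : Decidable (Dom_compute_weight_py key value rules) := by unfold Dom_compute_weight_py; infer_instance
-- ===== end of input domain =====

-- B replaces A's sequential branch accumulation with a single lookup in a precomputed
-- 12-entry outcome table indexed by (sensitive?, value-class, uppercase?); same return value.
-- ===== PORT A =====
def cwSensitive : List String := ["password", "secret", "token", "key", "api", "auth"]

-- A's body after the explicit-rule early return, step for step.
def cwBodyA (key : String) (value : String) : Int × String :=
  let lower := PySem.Str.lower key
  let st1 : Int × List String :=
    if cwSensitive.any (fun p => PySem.Str.isIn p lower) then (0 + 30, [] ++ ["sensitive key"]) else (0, [])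
  let st2 : Int × List String :=
    if value == "" || PySem.Str.strip value == "" then (st1.1 - 20, st1.2 ++ ["empty value"])
    else if decide ((64 : Int) < PySem.Str.len value) then (st1.1 + 10, st1.2 ++ ["long value"])
    else st1
  let st3 : Int × List String :=
    if key == PySem.Str.upper key then (st2.1 + 5, st2.2 ++ ["uppercase key"]) else st2
  (st3.1, if st3.2.isEmpty then "default" else PySem.Str.join ", " st3.2)

def compute_weight_py (key : String) (value : String) (rules : Option (List (String × Int))) : Int × String :=
  match rules with
  | some (e :: rest) =>  -- 'rules and key in rules': a non-empty dict containing key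
    match (e :: rest).find? (fun p => p.1 == key) with
    | some p => (p.2, "explicit rule")
    | none => cwBodyA key value
  | _ => cwBodyA key value

-- ===== PORT B =====
def cwSensitiveAlt : List String := ["password", "secret", "token", "key", "api", "auth"]

-- the three module-level option lists of Source B
def cwSOpts : List (Bool × Int × List String) := [(false, 0, []), (true, 30, ["sensitive key"])]
def cwVOpts : List (String × Int × List String) :=
  [("empty", -20, ["empty value"]), ("long", 10, ["long value"]), ("normal", 0, [])]
def cwUOpts : List (Bool × Int × List String) := [(false, 0, []), (true, 5, ["uppercase key"])]

-- the 12-entry outcome table, built once by the triple comprehension of Source B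
def cwTable : List ((Bool × String × Bool) × (Int × String)) :=
  cwSOpts.flatMap (fun s => cwVOpts.flatMap (fun v => cwUOpts.map (fun u =>
    ((s.1, v.1, u.1),
     (s.2.1 + v.2.1 + u.2.1,
      let j := PySem.Str.join ", " (s.2.2 ++ v.2.2 ++ u.2.2)
      if j == "" then "default" else j)))))

-- B's body: classify the three features, then one lookup in the precomputed table.
-- _TABLE[(s, vc, u)]: the key is always present in the table, KeyError is unreachable.
def cwBodyB (key : String) (value : String) : Int × String :=
  let lower := PySem.Str.lower key
  let s := cwSensitiveAlt.any (fun p => PySem.Str.isIn p lower)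
  let vc : String :=
    if PySem.Str.strip value == "" then "empty"
    else if decide ((64 : Int) < PySem.Str.len value) then "long" else "normal"
  let u := key == PySem.Str.upper key
  ((cwTable.find? (fun e => e.1 == (s, vc, u))).map Prod.snd).getD (0, "")

def compute_weight_py_alt (key : String) (value : String) (rules : Option (List (String × Int))) : Int × String :=
  -- 'rules and key in rules': rules None/empty is falsy; dict lookup is first match
  match (rules.getD []).find? (fun p => p.1 == key) with
  | some p => (p.2, "explicit rule")
  | none => cwBodyB key value

-- ===== PRECONDITION & SPEC =====
def Spec_compute_weight_py (key : String) (value : String) (rules : Option (List (String × Int))) (out : Int × String) : Prop := out = compute_weight_py_alt key value rules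
instance (key : String) (value : String) (rules : Option (List (String × Int))) (out : Int × String) : Decidable (Spec_compute_weight_py key value rules out) := by unfold Spec_compute_weight_py; infer_instance

-- ===== CLAIM (what is proved, stated in full; the proofs are below) =====
def Claim_equal_compute_weight_py : Prop := ∀ (key : String) (value : String) (rules : Option (List (String × Int))), Dom_compute_weight_py key value rules → Spec_compute_weight_py key value rules (compute_weight_py key value rules)

-- ===== LEMMAS AND PROOFS =====

-- the empty string strips to itself, so A's 'not value or value.strip() == ""' is B's single strip test
lemma strip_empty_iff (value : String) :
    (value == "" || PySem.Str.strip value == "") = (PySem.Str.strip value == "") := by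
  by_cases h : value = ""
  · subst h; decide
  · simp [h]

-- A's branch chain and B's table lookup, abstracted over the three feature-test results
def cwChainA (cs ce cl cu : Bool) : Int × String :=
  let st1 : Int × List String := if cs then (0 + 30, [] ++ ["sensitive key"]) else (0, [])
  let st2 : Int × List String :=
    if ce then (st1.1 - 20, st1.2 ++ ["empty value"])
    else if cl then (st1.1 + 10, st1.2 ++ ["long value"]) else st1
  let st3 : Int × List String := if cu then (st2.1 + 5, st2.2 ++ ["uppercase key"]) else st2
  (st3.1, if st3.2.isEmpty then "default" else PySem.Str.join ", " st3.2)

def cwChainB (cs ce cl cu : Bool) : Int × String :=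
  let vc : String := if ce then "empty" else if cl then "long" else "normal"
  ((cwTable.find? (fun e => e.1 == (cs, vc, cu))).map Prod.snd).getD (0, "")

set_option maxHeartbeats 2000000 in
lemma chain_eq (cs ce cl cu : Bool) : cwChainA cs ce cl cu = cwChainB cs ce cl cu := by
  cases cs <;> cases ce <;> cases cl <;> cases cu <;> decide

lemma body_eq (key : String) (value : String) : cwBodyA key value = cwBodyB key value := by
  rw [show cwBodyA key value = cwChainA
        (cwSensitive.any (fun p => PySem.Str.isIn p (PySem.Str.lower key)))
        (value == "" || PySem.Str.strip value == "")
        (decide ((64 : Int) < PySem.Str.len value))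
        (key == PySem.Str.upper key) from rfl,
      strip_empty_iff]
  exact chain_eq _ _ _ _

-- definitional unfolding lemmas for the two ports, one per shape of 'rules'
lemma a_none (key value : String) : compute_weight_py key value none = cwBodyA key value := rfl
lemma a_nil (key value : String) : compute_weight_py key value (some []) = cwBodyA key value := rfl
lemma a_cons (key value : String) (e : String × Int) (rest : List (String × Int)) :
    compute_weight_py key value (some (e :: rest)) =
      (match (e :: rest).find? (fun p => p.1 == key) with
       | some p => (p.2, "explicit rule")
       | none => cwBodyA key value) := rfl
lemma alt_eq (key value : String) (rules : Option (List (String × Int))) :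
    compute_weight_py_alt key value rules =
      (match (rules.getD []).find? (fun p => p.1 == key) with
       | some p => (p.2, "explicit rule")
       | none => cwBodyB key value) := rfl

-- ===== VERDICT (by name: the statement is the Claim_ definition above) =====
theorem compute_weight_py_spec : Claim_equal_compute_weight_py := by
  intro key value rules _
  unfold Spec_compute_weight_py
  rw [alt_eq]
  cases rules with
  | none => rw [a_none]; exact body_eq key value
  | some d =>
    cases d with
    | nil => rw [a_nil]; exact body_eq key value
    | cons e rest =>
      rw [a_cons]
      simp only [Option.getD_some]
      cases List.find? (fun p => p.1 == key) (e :: rest) <;> simp [body_eq]
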